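-- pv_equiv track=rewrite | github.com/Aa1643614923/binance-alpha-assistant | scripts/binance_alpha_assistant.py | build_alpha_symbol_index
-- ===== SOURCE A (Python) =====
-- from typing import Any, Callable, Dict, Iterable, List, Optional
--
-- def safe_first(items: Iterable[Any]) -> Any:
--     for item in items:
--         return item
--     return None
--
-- def build_alpha_symbol_index(exchange_info: Dict[str, Any]) -> Dict[str, str]:
--     index: Dict[str, List[str]] = {}
--     for item in exchange_info.get("symbols") or []:
--         base_asset = str(item.get("baseAsset") or "")
--         symbol = str(item.get("symbol") or "")
--         if not base_asset or not symbol: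
--             continue
--         index.setdefault(base_asset, []).append(symbol)
--     preferred: Dict[str, str] = {}
--     for base_asset, candidates in index.items():
--         preferred[base_asset] = safe_first(symbol for symbol in candidates if symbol.endswith("USDT")) or safe_first(symbol for symbol in candidates if symbol.endswith("USDC")) or candidates[0]
--     return preferred
-- ===== SOURCE B (Python) =====
-- def build_alpha_symbol_index(exchange_info):
--     # one pass: track (priority, symbol) per base; overwrite only on strictly higher priority
--     best = {}
--     for item in exchange_info.get("symbols") or []:
--         base_asset = str(item.get("baseAsset") or "")
--         symbol = str(item.get("symbol") or "")
--         if not base_asset or not symbol: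
--             continue
--         priority = 3 if symbol.endswith("USDT") else 2 if symbol.endswith("USDC") else 1
--         if base_asset not in best or best[base_asset][0] < priority:
--             best[base_asset] = (priority, symbol)
--     return {base: sym for base, (prio, sym) in best.items()}
-- ===== Notes on version B (the rewrite author's own statement) =====
-- stated objective: alternative
-- what changed: Replaces A's two-phase group-then-scan (build base->candidates lists, then re-scan each candidate list twice for USDT/USDC suffixes) with a single priority-tracking pass keeping one (priority, symbol) per base, overwritten only on strictly higher priority.
import Mathlib
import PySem

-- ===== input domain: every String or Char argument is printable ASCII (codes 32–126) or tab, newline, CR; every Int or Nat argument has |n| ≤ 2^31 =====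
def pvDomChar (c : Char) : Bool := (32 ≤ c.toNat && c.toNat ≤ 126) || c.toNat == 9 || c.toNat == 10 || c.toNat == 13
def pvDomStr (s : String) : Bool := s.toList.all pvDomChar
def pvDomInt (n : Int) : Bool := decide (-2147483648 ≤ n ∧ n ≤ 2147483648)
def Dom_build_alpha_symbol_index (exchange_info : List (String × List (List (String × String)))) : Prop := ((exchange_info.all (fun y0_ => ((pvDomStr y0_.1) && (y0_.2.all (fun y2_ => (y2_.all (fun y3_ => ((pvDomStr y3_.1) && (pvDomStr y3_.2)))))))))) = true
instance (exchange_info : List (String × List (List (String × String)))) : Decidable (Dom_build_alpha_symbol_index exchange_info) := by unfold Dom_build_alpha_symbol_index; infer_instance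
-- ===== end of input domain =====

-- B replaces A's group-then-scan two-phase structure by one priority-tracking pass; same results (alternative, not claimed faster).

-- ===== PORT A =====
-- safe_first over the filtered generators = List.find?; 'or' chains fall through because a found
-- symbol ends with a nonempty suffix, hence is truthy.  candidates[0]: the grouping loop only
-- stores nonempty candidate lists, so the index never raises; ported as headD "".
def pyPick (candidates : List String) : String :=
  match candidates.find? (fun s => PySem.Str.endswith s "USDT") with
  | some s => s
  | none =>
    match candidates.find? (fun s => PySem.Str.endswith s "USDC") with
    | some s => s
    | none => candidates.headD ""

def build_alpha_symbol_index (exchange_info : List (String × List (List (String × String)))) : List (String × String) :=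
  -- exchange_info.get("symbols") or []  (a missing key and an empty list both give [])
  let symbols := ((PySem.Dict.mk exchange_info).get? "symbols").getD []
  -- str(item.get(k) or ""): values are strings, so this is lookup-with-default ""
  let index : PySem.Dict String (List String) :=
    symbols.foldl (fun index item =>
      let base_asset := ((PySem.Dict.mk item).get? "baseAsset").getD ""
      let symbol := ((PySem.Dict.mk item).get? "symbol").getD ""
      if base_asset = "" || symbol = "" then index
      else index.modify base_asset [] (fun l => l ++ [symbol]))  -- setdefault(...,[]).append(symbol)
      PySem.Dict.empty
  (index.items.foldl (fun preferred kv => preferred.insert kv.1 (pyPick kv.2)) PySem.Dict.empty).items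

-- ===== PORT B =====
def pyPrio (symbol : String) : Int :=
  if PySem.Str.endswith symbol "USDT" then 3
  else if PySem.Str.endswith symbol "USDC" then 2
  else 1

def build_alpha_symbol_index_alt (exchange_info : List (String × List (List (String × String)))) : List (String × String) :=
  let symbols := ((PySem.Dict.mk exchange_info).get? "symbols").getD []
  let best : PySem.Dict String (Int × String) :=
    symbols.foldl (fun best item =>
      let base_asset := ((PySem.Dict.mk item).get? "baseAsset").getD ""
      let symbol := ((PySem.Dict.mk item).get? "symbol").getD ""
      if base_asset = "" || symbol = "" then best
      else
        let p := pyPrio symbol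
        match best.get? base_asset with
        | none => best.insert base_asset (p, symbol)
        | some q => if q.1 < p then best.insert base_asset (p, symbol) else best)
      PySem.Dict.empty
  best.items.map (fun kv => (kv.1, kv.2.2))

-- ===== PRECONDITION & SPEC =====
-- A is total and Pre_ excludes nothing: it holds on every input (the interesting inputs are the
-- ones carrying a "symbols" entry, as in pvWitness_ below; A returns {} on all others).
def Pre_build_alpha_symbol_index (exchange_info : List (String × List (List (String × String)))) : Prop :=
  "symbols" ∈ exchange_info.map (fun kv => kv.1) ∨ "symbols" ∉ exchange_info.map (fun kv => kv.1)
instance (exchange_info : List (String × List (List (String × String)))) : Decidable (Pre_build_alpha_symbol_index exchange_info) := by unfold Pre_build_alpha_symbol_index; infer_instance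
def pvWitness_build_alpha_symbol_index : (List (String × List (List (String × String)))) :=
  [("symbols", [[("baseAsset", "BTC"), ("symbol", "BTCUSDT")]])]
def Spec_build_alpha_symbol_index (exchange_info : List (String × List (List (String × String)))) (out : List (String × String)) : Prop := out = build_alpha_symbol_index_alt exchange_info
instance (exchange_info : List (String × List (List (String × String)))) (out : List (String × String)) : Decidable (Spec_build_alpha_symbol_index exchange_info out) := by unfold Spec_build_alpha_symbol_index; infer_instance

-- ===== CLAIM (what is proved, stated in full; the proofs are below) =====
def Claim_equal_build_alpha_symbol_index : Prop := ∀ (exchange_info : List (String × List (List (String × String)))), Dom_build_alpha_symbol_index exchange_info → Pre_build_alpha_symbol_index exchange_info → Spec_build_alpha_symbol_index exchange_info (build_alpha_symbol_index exchange_info)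

-- ===== LEMMAS AND PROOFS =====

-- the single-pass update B performs on its tracked (priority, symbol)
def pvUpd (b : Int × String) (s : String) : Int × String :=
  if b.1 < pyPrio s then (pyPrio s, s) else b

-- what B's tracked value is as a function of A's candidate list
def pvBestOf (l : List String) : Int × String := l.foldl pvUpd (0, "")

lemma pvPrio_pos (s : String) : 0 < pyPrio s := by
  unfold pyPrio; split_ifs <;> norm_num

lemma pvPrio_le (s : String) : pyPrio s ≤ 3 := by
  unfold pyPrio; split_ifs <;> norm_num

lemma pvBestOf_append (l : List String) (s : String) :
    pvBestOf (l ++ [s]) = pvUpd (pvBestOf l) s := by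
  simp [pvBestOf, List.foldl_append]

lemma pvFold3 (cs : List String) (x : String) :
    cs.foldl pvUpd (3, x) = (3, x) := by
  induction cs with
  | nil => rfl
  | cons c cs ih =>
    have h := pvPrio_le c
    simp only [List.foldl_cons, pvUpd]
    rw [if_neg (by omega)]
    exact ih

lemma pyPrio_usdt {s : String} (h : PySem.Str.endswith s "USDT" = true) : pyPrio s = 3 := by
  unfold pyPrio; rw [if_pos h]

lemma pyPrio_usdc {s : String} (ht : PySem.Str.endswith s "USDT" = false)
    (hc : PySem.Str.endswith s "USDC" = true) : pyPrio s = 2 := by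
  unfold pyPrio; rw [ht]; simp only [Bool.false_eq_true, if_false]; rw [if_pos hc]

lemma pyPrio_other {s : String} (ht : PySem.Str.endswith s "USDT" = false)
    (hc : PySem.Str.endswith s "USDC" = false) : pyPrio s = 1 := by
  unfold pyPrio; rw [ht, hc]; simp

lemma pvFold2 (cs : List String) (x : String) :
    cs.foldl pvUpd (2, x) =
      match cs.find? (fun s => PySem.Str.endswith s "USDT") with
      | some s => (3, s)
      | none => (2, x) := by
  induction cs generalizing x with
  | nil => rfl
  | cons c cs ih =>
    cases ht : PySem.Str.endswith c "USDT" with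
    | true =>
      rw [List.find?_cons_of_pos (by exact ht)]
      simp only [List.foldl_cons, pvUpd, pyPrio_usdt ht]
      rw [if_pos (by norm_num)]
      exact pvFold3 cs c
    | false =>
      have hle : pyPrio c ≤ 2 := by
        cases hc : PySem.Str.endswith c "USDC" with
        | true => rw [pyPrio_usdc ht hc]
        | false => rw [pyPrio_other ht hc]; norm_num
      rw [List.find?_cons_of_neg (p := fun s => PySem.Str.endswith s "USDT") (by simpa using ht)]
      simp only [List.foldl_cons, pvUpd]
      rw [if_neg (by omega)]
      exact ih x

lemma pvFold1 (cs : List String) (x : String) :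
    cs.foldl pvUpd (1, x) =
      match cs.find? (fun s => PySem.Str.endswith s "USDT") with
      | some s => (3, s)
      | none =>
        match cs.find? (fun s => PySem.Str.endswith s "USDC") with
        | some s => (2, s)
        | none => (1, x) := by
  induction cs generalizing x with
  | nil => rfl
  | cons c cs ih =>
    cases ht : PySem.Str.endswith c "USDT" with
    | true =>
      rw [List.find?_cons_of_pos (by exact ht)]
      simp only [List.foldl_cons, pvUpd, pyPrio_usdt ht]
      rw [if_pos (by norm_num)]
      exact pvFold3 cs c
    | false =>
      rw [List.find?_cons_of_neg (p := fun s => PySem.Str.endswith s "USDT") (by simpa using ht)]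
      cases hc : PySem.Str.endswith c "USDC" with
      | true =>
        rw [List.find?_cons_of_pos (by exact hc)]
        simp only [List.foldl_cons, pvUpd, pyPrio_usdc ht hc]
        rw [if_pos (by norm_num)]
        exact pvFold2 cs c
      | false =>
        rw [List.find?_cons_of_neg (p := fun s => PySem.Str.endswith s "USDC") (by simpa using hc)]
        simp only [List.foldl_cons, pvUpd, pyPrio_other ht hc]
        rw [if_neg (by norm_num)]
        exact ih x

lemma pvBestOf_snd_eq_pick (l : List String) (h : l ≠ []) :
    (pvBestOf l).2 = pyPick l := by
  match l with
  | c :: cs =>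
    have h0 : pvBestOf (c :: cs) = cs.foldl pvUpd (pyPrio c, c) := by
      simp [pvBestOf, pvUpd, pvPrio_pos c]
    unfold pyPick
    cases ht : PySem.Str.endswith c "USDT" with
    | true =>
      rw [h0, pyPrio_usdt ht, pvFold3, List.find?_cons_of_pos (by exact ht)]
    | false =>
      rw [List.find?_cons_of_neg (p := fun s => PySem.Str.endswith s "USDT") (by simpa using ht)]
      cases hc : PySem.Str.endswith c "USDC" with
      | true =>
        rw [h0, pyPrio_usdc ht hc, pvFold2, List.find?_cons_of_pos (by exact hc)]
        cases cs.find? (fun s => PySem.Str.endswith s "USDT") <;> simp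
      | false =>
        rw [List.find?_cons_of_neg (p := fun s => PySem.Str.endswith s "USDC") (by simpa using hc)]
        rw [h0, pyPrio_other ht hc, pvFold1]
        cases hf : cs.find? (fun s => PySem.Str.endswith s "USDT") <;>
          cases hg : cs.find? (fun s => PySem.Str.endswith s "USDC") <;> simp

-- find? over a value-mapped association list
lemma pvFind_map_keyed {α β : Type} (l : List (String × α)) (f : α → β) (k : String) :
    (l.map (fun kv => (kv.1, f kv.2))).find? (fun p => p.1 == k)
      = (l.find? (fun p => p.1 == k)).map (fun kv => (kv.1, f kv.2)) := by
  induction l with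
  | nil => rfl
  | cons a l ih =>
    by_cases h : a.1 = k
    · simp [h]
    · simp [h, ih]

-- the invariant between A's grouping dict and B's tracking dict
def pvInv (d : PySem.Dict String (List String)) (e : PySem.Dict String (Int × String)) : Prop :=
  e.items = d.items.map (fun kv => (kv.1, pvBestOf kv.2)) ∧
  d.keys.Nodup ∧
  ∀ kv ∈ d.items, kv.2 ≠ []

lemma pvInv_get? {d : PySem.Dict String (List String)} {e : PySem.Dict String (Int × String)}
    (h : pvInv d e) (k : String) : e.get? k = (d.get? k).map pvBestOf := by
  obtain ⟨hi, _, _⟩ := h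
  simp only [PySem.Dict.get?, hi, pvFind_map_keyed]
  cases d.items.find? (fun p => p.1 == k) <;> rfl

lemma pvInv_step (d : PySem.Dict String (List String)) (e : PySem.Dict String (Int × String))
    (h : pvInv d e) (b s : String) :
    pvInv (d.modify b [] (fun l => l ++ [s]))
      (match e.get? b with
       | none => e.insert b (pyPrio s, s)
       | some q => if q.1 < pyPrio s then e.insert b (pyPrio s, s) else e) := by
  obtain ⟨hi, hnd, hne⟩ := h
  have hget := pvInv_get? ⟨hi, hnd, hne⟩ b
  cases hd : d.get? b with
  | none =>
    have hcd : d.contains b = false := by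
      rw [PySem.Dict.contains_eq_isSome_get?, hd]; rfl
    have hce : e.contains b = false := by
      rw [PySem.Dict.contains_eq_isSome_get?, hget, hd]; rfl
    have hmod : d.modify b [] (fun l => l ++ [s]) = d.insert b [s] := by
      unfold PySem.Dict.modify
      rw [PySem.Dict.getD_of_not_contains d [] hcd]
      rfl
    rw [hget, hd]
    simp only [Option.map_none]
    refine ⟨?_, ?_, ?_⟩
    · rw [hmod, PySem.Dict.items_insert_of_not_contains _ _ hcd,
          PySem.Dict.items_insert_of_not_contains _ _ hce, hi]
      simp only [List.map_append, List.map_cons, List.map_nil]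
      have : pvBestOf [s] = (pyPrio s, s) := by
        simp [pvBestOf, pvUpd, pvPrio_pos s]
      rw [this]
    · rw [hmod, PySem.Dict.keys_insert_of_not_contains _ _ hcd]
      have hb : b ∉ d.keys := by
        intro hmem
        rw [(PySem.Dict.contains_iff_mem_keys d b).mpr hmem] at hcd
        cases hcd
      simp only [List.nodup_append, List.nodup_singleton, true_and]
      refine ⟨hnd, ?_⟩
      intro a ha c hc
      have hcb : c = b := by simpa using hc
      subst hcb
      intro h
      subst h
      exact hb ha
    · intro kv hkv
      rw [hmod, PySem.Dict.items_insert_of_not_contains _ _ hcd] at hkv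
      rcases List.mem_append.mp hkv with h1 | h1
      · exact hne kv h1
      · simp at h1; subst h1; simp
  | some cands =>
    have hcd : d.contains b = true := by
      rw [PySem.Dict.contains_eq_isSome_get?, hd]; rfl
    have hmod : d.modify b [] (fun l => l ++ [s]) = d.insert b (cands ++ [s]) := by
      unfold PySem.Dict.modify
      rw [PySem.Dict.getD_of_get?_eq_some d [] hd]
    have hkey : ∀ kv ∈ d.items, kv.1 = b → kv.2 = cands := by
      intro kv hkv hk
      have := PySem.Dict.get?_of_mem_items d (k := kv.1) (v := kv.2) (by simpa using hkv) hnd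
      rw [hk, hd] at this
      exact Option.some.inj this.symm
    rw [hget, hd]
    simp only [Option.map_some]
    by_cases hlt : (pvBestOf cands).1 < pyPrio s
    · -- B overwrites; both dicts replace the entry at key b
      have hce : e.contains b = true := by
        rw [PySem.Dict.contains_eq_isSome_get?, hget, hd]; rfl
      rw [if_pos hlt]
      refine ⟨?_, ?_, ?_⟩
      · rw [hmod, PySem.Dict.items_insert_of_contains _ _ hcd,
            PySem.Dict.items_insert_of_contains _ _ hce, hi]
        rw [List.map_map, List.map_map]
        apply List.map_congr_left
        intro kv hkv
        by_cases hk : kv.1 = b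
        · simp only [Function.comp_apply, hk, beq_self_eq_true, if_pos]
          rw [pvBestOf_append]
          simp [pvUpd, hlt]
        · simp [Function.comp_apply, hk]
      · rw [hmod, PySem.Dict.keys_insert_of_contains _ _ hcd]; exact hnd
      · intro kv hkv
        rw [hmod, PySem.Dict.items_insert_of_contains _ _ hcd] at hkv
        rcases List.mem_map.mp hkv with ⟨p, hp, hpe⟩
        by_cases hk : p.1 = b
        · rw [← hpe]; simp [hk]
        · rw [← hpe]; simp only [hk, beq_iff_eq]; exact hne p hp
    · -- B keeps its entry; A's replacement stores an equivalent candidate list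
      rw [if_neg hlt]
      refine ⟨?_, ?_, ?_⟩
      · rw [hmod, PySem.Dict.items_insert_of_contains _ _ hcd, hi, List.map_map]
        apply List.map_congr_left
        intro kv hkv
        by_cases hk : kv.1 = b
        · simp only [Function.comp_apply, hk, beq_self_eq_true, if_pos]
          rw [hkey kv hkv hk, pvBestOf_append]
          simp [pvUpd, hlt]
        · simp [Function.comp_apply, hk]
      · rw [hmod, PySem.Dict.keys_insert_of_contains _ _ hcd]; exact hnd
      · intro kv hkv
        rw [hmod, PySem.Dict.items_insert_of_contains _ _ hcd] at hkv
        rcases List.mem_map.mp hkv with ⟨p, hp, hpe⟩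
        by_cases hk : p.1 = b
        · rw [← hpe]; simp [hk]
        · rw [← hpe]; simp only [hk, beq_iff_eq]; exact hne p hp

lemma pvInv_fold (symbols : List (List (String × String)))
    (d : PySem.Dict String (List String)) (e : PySem.Dict String (Int × String))
    (h : pvInv d e) :
    pvInv
      (symbols.foldl (fun index item =>
        let base_asset := ((PySem.Dict.mk item).get? "baseAsset").getD ""
        let symbol := ((PySem.Dict.mk item).get? "symbol").getD ""
        if base_asset = "" || symbol = "" then index
        else index.modify base_asset [] (fun l => l ++ [symbol])) d)
      (symbols.foldl (fun best item =>
        let base_asset := ((PySem.Dict.mk item).get? "baseAsset").getD ""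
        let symbol := ((PySem.Dict.mk item).get? "symbol").getD ""
        if base_asset = "" || symbol = "" then best
        else
          let p := pyPrio symbol
          match best.get? base_asset with
          | none => best.insert base_asset (p, symbol)
          | some q => if q.1 < p then best.insert base_asset (p, symbol) else best) e) := by
  induction symbols generalizing d e with
  | nil => exact h
  | cons item rest ih =>
    simp only [List.foldl_cons]
    set b := ((PySem.Dict.mk item).get? "baseAsset").getD "" with hb
    set s := ((PySem.Dict.mk item).get? "symbol").getD "" with hs
    by_cases hskip : b = "" || s = ""
    · rw [if_pos hskip, if_pos hskip]
      exact ih d e h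
    · rw [if_neg hskip, if_neg hskip]
      exact ih _ _ (pvInv_step d e h b s)

lemma pvInv_empty : pvInv PySem.Dict.empty PySem.Dict.empty :=
  ⟨rfl, List.nodup_nil, by intro kv hkv; cases hkv⟩

lemma pvMain (symbols : List (List (String × String))) :
    (((symbols.foldl (fun index item =>
        let base_asset := ((PySem.Dict.mk item).get? "baseAsset").getD ""
        let symbol := ((PySem.Dict.mk item).get? "symbol").getD ""
        if base_asset = "" || symbol = "" then index
        else index.modify base_asset [] (fun l => l ++ [symbol]))
        PySem.Dict.empty).items.foldl
          (fun preferred kv => preferred.insert kv.1 (pyPick kv.2)) PySem.Dict.empty).items)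
    = ((symbols.foldl (fun best item =>
        let base_asset := ((PySem.Dict.mk item).get? "baseAsset").getD ""
        let symbol := ((PySem.Dict.mk item).get? "symbol").getD ""
        if base_asset = "" || symbol = "" then best
        else
          let p := pyPrio symbol
          match best.get? base_asset with
          | none => best.insert base_asset (p, symbol)
          | some q => if q.1 < p then best.insert base_asset (p, symbol) else best)
        PySem.Dict.empty).items.map (fun kv => (kv.1, kv.2.2))) := by
  obtain ⟨hi, hnd, hne⟩ := pvInv_fold symbols PySem.Dict.empty PySem.Dict.empty pvInv_empty
  have hnd' : ((symbols.foldl (fun index item =>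
        let base_asset := ((PySem.Dict.mk item).get? "baseAsset").getD ""
        let symbol := ((PySem.Dict.mk item).get? "symbol").getD ""
        if base_asset = "" || symbol = "" then index
        else index.modify base_asset [] (fun l => l ++ [symbol]))
        PySem.Dict.empty).items.map (fun kv => kv.1)).Nodup := by
    simpa only [PySem.Dict.keys] using hnd
  refine Eq.trans (PySem.Dict.items_foldl_insert_fresh _ (fun kv : String × List String => kv.1) (fun kv => pyPick kv.2) _
        (fun a _ => PySem.Dict.contains_empty _) hnd') ?_
  rw [hi, List.map_map]
  simp only [PySem.Dict.empty, List.nil_append]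
  apply List.map_congr_left
  intro kv hkv
  simp only [Function.comp_apply]
  rw [pvBestOf_snd_eq_pick kv.2 (hne kv hkv)]

-- ===== VERDICT (by name: the statement is the Claim_ definition above) =====
theorem build_alpha_symbol_index_spec : Claim_equal_build_alpha_symbol_index := by
  intro exchange_info _ _
  unfold Spec_build_alpha_symbol_index
  exact pvMain (((PySem.Dict.mk exchange_info).get? "symbols").getD [])
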